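-- pv_equiv track=rewrite | github.com/arindhimar/BluePineapple | Python Programs/06-01-26/149.py | find_longest_subsequence_with_adjacent_diff_one
-- ===== SOURCE A (Python) =====
-- def find_longest_subsequence_with_adjacent_diff_one(arr):
--     longest_subseq=[]
--     current_subseq=[]
--
--     for i in range(len(arr)):
--         if i ==0 or abs(arr[i]-arr[i-1])==1:
--             current_subseq.append(arr[i])
--         else:
--             if len(current_subseq)>len(longest_subseq):
--                 longest_subseq=current_subseq
--             current_subseq=[arr[i]]
--
--     if len(current_subseq)>len(longest_subseq):
--         longest_subseq=current_subseq
--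
--     return longest_subseq
-- ===== SOURCE B (Python) =====
-- def find_longest_subsequence_with_adjacent_diff_one(arr):
--     if not arr:
--         return []
--     # dynamic programming: run length of the adjacent-diff-1 run ending at each index
--     lengths = []
--     for i in range(len(arr)):
--         if i > 0 and abs(arr[i] - arr[i - 1]) == 1:
--             lengths.append(lengths[-1] + 1)
--         else:
--             lengths.append(1)
--     m = max(lengths)
--     end = lengths.index(m)
--     return arr[end - m + 1 : end + 1]
-- ===== Notes on version B (the rewrite author's own statement) =====
-- stated objective: alternative
-- what changed: B replaces A's interleaved run-building/best-tracking with dynamic programming: it computes the run length ending at every index (lengths[i] = lengths[i-1]+1 on an adjacent diff of 1, else 1), then takes m = max(lengths) and its first index, and extracts the answer as a single arithmetic slice arr[end-m+1:end+1]; no candidate sublists are ever built during the scan.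
import Mathlib
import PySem

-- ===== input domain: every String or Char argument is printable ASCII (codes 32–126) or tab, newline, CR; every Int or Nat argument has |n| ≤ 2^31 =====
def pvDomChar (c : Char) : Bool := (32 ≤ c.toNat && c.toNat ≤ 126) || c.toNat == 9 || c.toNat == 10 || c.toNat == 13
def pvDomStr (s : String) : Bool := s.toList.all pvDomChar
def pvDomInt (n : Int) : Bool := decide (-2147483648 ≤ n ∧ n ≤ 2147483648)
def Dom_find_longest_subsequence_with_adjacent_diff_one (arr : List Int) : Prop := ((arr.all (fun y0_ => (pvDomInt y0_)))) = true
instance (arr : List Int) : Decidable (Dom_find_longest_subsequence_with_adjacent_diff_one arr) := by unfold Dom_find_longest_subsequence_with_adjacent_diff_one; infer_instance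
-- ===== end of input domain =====

-- B replaces A's interleaved run-building/best-tracking by dynamic programming: run length
-- ending at each index, then max + first index of the max, then one arithmetic slice.

-- ===== PORT A =====
-- loop body of A's 'for i in range(len(arr))'; state = (longest_subseq, current_subseq).
-- arr.getD i 0 is Python's arr[i]: every index used is in range (0 ≤ i < len(arr)).
def pvStepA (arr : List Int) (st : List Int × List Int) (i : Nat) : List Int × List Int :=
  if i = 0 ∨ ((arr.getD i 0) - (arr.getD (i - 1) 0)).natAbs = 1 then
    (st.1, st.2 ++ [arr.getD i 0])
  else
    ((if st.2.length > st.1.length then st.2 else st.1), [arr.getD i 0])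

def find_longest_subsequence_with_adjacent_diff_one (arr : List Int) : List Int :=
  let st := (List.range arr.length).foldl (pvStepA arr) ([], [])
  if st.2.length > st.1.length then st.2 else st.1

-- ===== PORT B =====
-- loop body of B's 'for i in range(len(arr))'; state = lengths.
-- lengths[-1] is lengths.getLastD 0 (lengths is nonempty whenever i > 0).
def pvStepB (arr : List Int) (L : List Nat) (i : Nat) : List Nat :=
  if 0 < i ∧ ((arr.getD i 0) - (arr.getD (i - 1) 0)).natAbs = 1 then
    L ++ [L.getLastD 0 + 1]
  else
    L ++ [1]

def find_longest_subsequence_with_adjacent_diff_one_alt (arr : List Int) : List Int :=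
  if arr = [] then []
  else
    let L := (List.range arr.length).foldl (pvStepB arr) []
    -- max(lengths): L is nonempty here, so max? is some; getD extracts it
    let m := (PySem.List.max? L (fun x => x)).getD 0
    -- lengths.index(m): m ∈ L here, so index? is some
    let e := (PySem.List.index? L m).getD 0
    PySem.List.slice arr (some ((e : Int) - (m : Int) + 1)) (some ((e : Int) + 1))

-- ===== PRECONDITION & SPEC =====
def Spec_find_longest_subsequence_with_adjacent_diff_one (arr : List Int) (out : List Int) : Prop := out = find_longest_subsequence_with_adjacent_diff_one_alt arr
instance (arr : List Int) (out : List Int) : Decidable (Spec_find_longest_subsequence_with_adjacent_diff_one arr out) := by unfold Spec_find_longest_subsequence_with_adjacent_diff_one; infer_instance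

-- ===== CLAIM (what is proved, stated in full; the proofs are below) =====
def Claim_equal_find_longest_subsequence_with_adjacent_diff_one : Prop := ∀ (arr : List Int), Dom_find_longest_subsequence_with_adjacent_diff_one arr → Spec_find_longest_subsequence_with_adjacent_diff_one arr (find_longest_subsequence_with_adjacent_diff_one arr)

-- ===== LEMMAS AND PROOFS =====

def pvMaxN (L : List Nat) : Nat := L.foldl max 0

theorem pvFoldlMax_start (Y : List Nat) : ∀ a : Nat, Y.foldl max a = max a (Y.foldl max 0) := by
  induction Y with
  | nil => intro a; simp
  | cons y t ih =>
    intro a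
    rw [List.foldl_cons, List.foldl_cons, ih (max a y), ih (max 0 y)]
    omega

theorem pvMaxN_append (X Y : List Nat) : pvMaxN (X ++ Y) = max (pvMaxN X) (pvMaxN Y) := by
  unfold pvMaxN
  rw [List.foldl_append, pvFoldlMax_start]

theorem pvMaxN_range' (l : Nat) : pvMaxN (List.range' 1 l) = l := by
  induction l with
  | zero => rfl
  | succ l ih =>
    rw [List.range'_concat, pvMaxN_append, ih]
    simp [pvMaxN]
    omega

theorem pvIndex?_append_of_not_mem (X Y : List Nat) (v : Nat) (h : v ∉ X) :
    PySem.List.index? (X ++ Y) v = (PySem.List.index? Y v).map (· + X.length) := by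
  induction X with
  | nil => simp
  | cons x t ih =>
    have hx : x ≠ v := fun he => h (he ▸ List.mem_cons_self)
    have ht : v ∉ t := fun hm => h (List.mem_cons_of_mem _ hm)
    rw [List.cons_append, PySem.List.index?_cons_of_ne _ hx, ih ht]
    cases PySem.List.index? Y v <;> simp <;> omega

theorem pvIndex?_range'_last (l : Nat) (h : 1 ≤ l) :
    PySem.List.index? (List.range' 1 l) l = some (l - 1) := by
  have hsplit : List.range' 1 l = List.range' 1 (l - 1) ++ [l] := by
    conv_lhs => rw [show l = (l - 1) + 1 from by omega, List.range'_concat]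
    rw [show 1 + 1 * (l - 1) = l from by omega]
  have hnm : l ∉ List.range' 1 (l - 1) := by
    intro hmem
    rw [List.mem_range'] at hmem
    omega
  rw [hsplit, PySem.List.index?_append_singleton_self _ _ hnm, List.length_range']

theorem pvGetLastD_append_range' (Lc : List Nat) (l : Nat) (h : 1 ≤ l) :
    (Lc ++ List.range' 1 l).getLastD 0 = l := by
  have he : l = (l - 1) + 1 := by omega
  conv_lhs => rw [he, List.range'_concat, ← List.append_assoc]
  rw [List.getLastD_concat]
  omega

theorem pvSlice_snoc (arr : List Int) (start i : Nat) (h1 : start ≤ i) (h2 : i < arr.length) :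
    (arr.drop start).take (i - start) ++ [arr.getD i 0] = (arr.drop start).take (i + 1 - start) := by
  have hm : i + 1 - start = (i - start) + 1 := by omega
  rw [hm, List.take_succ]
  have hg : (arr.drop start)[i - start]? = some (arr.getD i 0) := by
    rw [List.getElem?_drop]
    have : start + (i - start) = i := by omega
    rw [this, List.getElem?_eq_getElem h2, List.getD_eq_getElem?_getD,
        List.getElem?_eq_getElem h2]
    rfl
  rw [hg]
  rfl

theorem pvSlice_one (arr : List Int) (i : Nat) (h : i < arr.length) :
    [arr.getD i 0] = (arr.drop i).take (i + 1 - i) := by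
  have h2 := pvSlice_snoc arr i i (le_refl i) h
  simp only [Nat.sub_self, List.take_zero, List.nil_append] at h2
  exact h2

theorem pvSliceLen (arr : List Int) (l i : Nat) (h1 : l ≤ i) (h2 : i ≤ arr.length) :
    ((arr.drop (i - l)).take l).length = l := by
  simp [List.length_take, List.length_drop]
  omega

-- the coupling invariant: after processing indices 0..i-1, A's state is (lg, cur) and B's
-- lengths list is L = Lc ++ [1,…,ℓ] where ℓ is the current run length; lg is the slice at
-- the first index e_c where the completed part Lc attains its maximum.
def pvInv (arr : List Int) (i : Nat) (lg cur : List Int) (L : List Nat) : Prop :=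
  ∃ (Lc : List Nat) (l : Nat),
    1 ≤ l ∧ l ≤ i ∧ Lc.length = i - l ∧
    L = Lc ++ List.range' 1 l ∧
    cur = (arr.drop (i - l)).take l ∧
    lg.length = pvMaxN Lc ∧
    (Lc = [] → lg = []) ∧
    (Lc ≠ [] → ∃ e_c, PySem.List.index? Lc (pvMaxN Lc) = some e_c ∧ e_c + 1 ≤ i - l ∧
        pvMaxN Lc ≤ e_c + 1 ∧ lg = (arr.drop (e_c + 1 - pvMaxN Lc)).take (pvMaxN Lc))

theorem pvMain (arr : List Int) :
    ∀ (k i : Nat) (lg cur : List Int) (L : List Nat), 1 ≤ i → i + k ≤ arr.length →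
    pvInv arr i lg cur L →
    pvInv arr (i + k)
      ((List.range' i k).foldl (pvStepA arr) (lg, cur)).1
      ((List.range' i k).foldl (pvStepA arr) (lg, cur)).2
      ((List.range' i k).foldl (pvStepB arr) L) := by
  intro k
  induction k with
  | zero => intro i lg cur L _ _ h; simpa using h
  | succ k ih =>
    intro i lg cur L hi hk hinv
    obtain ⟨Lc, l, hl1, hli, hlen, hL, hcur, hlg, hnil, hcons⟩ := hinv
    have hiLen : i < arr.length := by omega
    have hcl : cur.length = l := hcur ▸ pvSliceLen arr l i hli (by omega)
    rw [List.range'_succ, List.foldl_cons, List.foldl_cons]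
    have harith : i + (k + 1) = (i + 1) + k := by omega
    rw [harith]
    by_cases hd : ((arr.getD i 0) - (arr.getD (i - 1) 0)).natAbs = 1
    · -- the run continues
      have hA : pvStepA arr (lg, cur) i = (lg, cur ++ [arr.getD i 0]) := by
        unfold pvStepA; rw [if_pos (Or.inr hd)]
      have hB : pvStepB arr L i = L ++ [L.getLastD 0 + 1] := by
        unfold pvStepB; rw [if_pos ⟨by omega, hd⟩]
      rw [hA, hB]
      refine ih (i + 1) lg (cur ++ [arr.getD i 0]) (L ++ [L.getLastD 0 + 1]) (by omega) (by omega) ?_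
      refine ⟨Lc, l + 1, by omega, by omega, by omega, ?_, ?_, hlg, hnil, ?_⟩
      · rw [hL, pvGetLastD_append_range' Lc l hl1, List.range'_concat, ← List.append_assoc]
        have : 1 + 1 * l = l + 1 := by omega
        rw [this]
      · have hs := pvSlice_snoc arr (i - l) i (by omega) hiLen
        rw [show i - (i - l) = l from by omega, show i + 1 - (i - l) = l + 1 from by omega] at hs
        rw [show i + 1 - (l + 1) = i - l from by omega, hcur, hs]
      · intro hne
        obtain ⟨e_c, h1, h2, h3, h4⟩ := hcons hne
        exact ⟨e_c, h1, by omega, h3, h4⟩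
    · -- a break: the current run is closed
      have hA : pvStepA arr (lg, cur) i
          = ((if cur.length > lg.length then cur else lg), [arr.getD i 0]) := by
        unfold pvStepA; rw [if_neg (by push_neg; exact ⟨by omega, hd⟩)]
      have hB : pvStepB arr L i = L ++ [1] := by
        unfold pvStepB
        rw [if_neg (by intro hc; exact hd hc.2)]
      rw [hA, hB]
      refine ih (i + 1) _ _ _ (by omega) (by omega) ?_
      have hLne : L ≠ [] := by
        rw [hL]
        intro hcontra
        have := congrArg List.length hcontra
        simp [List.length_range'] at this
        omega
      have hmaxL : pvMaxN L = max (pvMaxN Lc) l := by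
        rw [hL, pvMaxN_append, pvMaxN_range']
      refine ⟨L, 1, le_refl 1, by omega, by rw [hL]; simp [List.length_range']; omega, ?_, ?_, ?_, fun h => absurd h hLne, ?_⟩
      · show L ++ [1] = L ++ List.range' 1 1
        rfl
      · have hs := pvSlice_one arr i hiLen
        rw [show i + 1 - i = 1 from by omega] at hs
        rw [show i + 1 - 1 = i from by omega]
        exact hs
      · -- length of the new longest = pvMaxN L
        rw [hmaxL]
        by_cases hc : cur.length > lg.length
        · rw [if_pos hc]; omega
        · rw [if_neg hc]; omega
      · intro _
        by_cases hc : cur.length > lg.length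
        · -- new maximum: the run just closed, ending at i-1
          have hmx : pvMaxN L = l := by rw [hmaxL]; omega
          have hnm : l ∉ Lc := by
            intro hmem
            have := (PySem.List.le_foldl_max Lc 0).2 l hmem
            have : l ≤ pvMaxN Lc := this
            omega
          refine ⟨i - 1, ?_, by omega, by rw [hmx]; omega, ?_⟩
          · rw [hmx, hL, pvIndex?_append_of_not_mem _ _ _ hnm,
               pvIndex?_range'_last l hl1]
            simp
            omega
          · rw [if_pos hc, hmx, hcur]
            have : i - 1 + 1 - l = i - l := by omega
            rw [this]
        · -- maximum unchanged
          have hlle : l ≤ pvMaxN Lc := by omega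
          have hLcne : Lc ≠ [] := by
            intro hcontra
            rw [hcontra] at hlle
            simp [pvMaxN] at hlle
            omega
          obtain ⟨e_c, h1, h2, h3, h4⟩ := hcons hLcne
          have hmx : pvMaxN L = pvMaxN Lc := by rw [hmaxL]; omega
          have hmem : pvMaxN Lc ∈ Lc := by
            have := (PySem.List.index?_isSome_iff Lc (pvMaxN Lc)).mp (by rw [h1]; rfl)
            exact this
          refine ⟨e_c, ?_, by omega, by rw [hmx]; omega, ?_⟩
          · rw [hmx, hL, PySem.List.index?_append_of_mem _ hmem, h1]
          · rw [if_neg hc, hmx]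
            exact h4

-- ===== VERDICT (by name: the statement is the Claim_ definition above) =====
theorem find_longest_subsequence_with_adjacent_diff_one_spec : Claim_equal_find_longest_subsequence_with_adjacent_diff_one := by
  intro arr _
  show find_longest_subsequence_with_adjacent_diff_one arr
      = find_longest_subsequence_with_adjacent_diff_one_alt arr
  by_cases hnil : arr = []
  · subst hnil; rfl
  · have hn : 0 < arr.length := List.length_pos_iff.mpr hnil
    unfold find_longest_subsequence_with_adjacent_diff_one
      find_longest_subsequence_with_adjacent_diff_one_alt
    rw [if_neg hnil]
    simp only
    rw [List.range_eq_range']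
    have hsplit : List.range' 0 arr.length = 0 :: List.range' 1 (arr.length - 1) := by
      have he : arr.length = (arr.length - 1) + 1 := by omega
      conv_lhs => rw [he]
      rw [List.range'_succ]
    rw [hsplit, List.foldl_cons, List.foldl_cons]
    have h0A : pvStepA arr ([], []) 0 = ([], [arr.getD 0 0]) := by
      unfold pvStepA; rw [if_pos (Or.inl rfl)]; rfl
    have h0B : pvStepB arr [] 0 = [1] := by
      unfold pvStepB; rw [if_neg (by intro hc; exact absurd hc.1 (by omega))]; rfl
    rw [h0A, h0B]
    have hinv1 : pvInv arr 1 [] [arr.getD 0 0] [1] := by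
      refine ⟨[], 1, le_refl 1, le_refl 1, rfl, rfl, ?_, rfl, fun _ => rfl, fun h => absurd rfl h⟩
      have := pvSlice_one arr 0 hn
      simpa using this
    have hinv := pvMain arr (arr.length - 1) 1 [] [arr.getD 0 0] [1] (le_refl 1)
      (by omega) hinv1
    have hlen : 1 + (arr.length - 1) = arr.length := by omega
    rw [hlen] at hinv
    set stA := (List.range' 1 (arr.length - 1)).foldl (pvStepA arr) ([], [arr.getD 0 0]) with hstA
    set L := (List.range' 1 (arr.length - 1)).foldl (pvStepB arr) [1] with hsL
    obtain ⟨Lc, l, hl1, hli, hLclen, hL, hcur, hlg, hnilc, hcons⟩ := hinv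
    have hcl : stA.2.length = l := hcur ▸ pvSliceLen arr l arr.length hli (le_refl _)
    -- m = max over L
    have hm : (PySem.List.max? L (fun x => x)).getD 0 = max (pvMaxN Lc) l := by
      have hmaxL : pvMaxN L = max (pvMaxN Lc) l := by
        rw [hL, pvMaxN_append, pvMaxN_range']
      rw [← hmaxL]
      cases hLc : L with
      | nil =>
        exfalso
        rw [hLc] at hL
        have := congrArg List.length hL
        simp [List.length_range'] at this
        omega
      | cons x t =>
        rw [PySem.List.max?_id_cons, Option.getD_some]
        unfold pvMaxN
        rw [List.foldl_cons, Nat.zero_max]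
    rw [hm]
    by_cases hc : pvMaxN Lc < l
    · -- the last run wins: A returns cur
      have hmx : max (pvMaxN Lc) l = l := by omega
      rw [hmx]
      have hnm : l ∉ Lc := by
        intro hmem
        have := (PySem.List.le_foldl_max Lc 0).2 l hmem
        have : l ≤ pvMaxN Lc := this
        omega
      have he : (PySem.List.index? L l).getD 0 = arr.length - 1 := by
        rw [hL, pvIndex?_append_of_not_mem _ _ _ hnm, pvIndex?_range'_last l hl1]
        simp
        omega
      rw [he]
      have hA : (if stA.2.length > stA.1.length then stA.2 else stA.1) = stA.2 := by
        rw [if_pos (by omega)]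
      rw [hA, hcur]
      have hcast1 : ((arr.length - 1 : Nat) : Int) - (l : Int) + 1 = ((arr.length - l : Nat) : Int) := by
        push_cast [Nat.cast_sub (by omega : 1 ≤ arr.length), Nat.cast_sub (by omega : l ≤ arr.length)]
        ring
      have hcast2 : ((arr.length - 1 : Nat) : Int) + 1 = ((arr.length : Nat) : Int) := by
        push_cast [Nat.cast_sub (by omega : 1 ≤ arr.length)]
        ring
      rw [hcast1, hcast2, PySem.List.slice_natCast]
      have : arr.length - (arr.length - l) = l := by omega
      rw [this]
    · -- an earlier run wins (first-wins tie-break): A returns longest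
      have hlle : l ≤ pvMaxN Lc := by omega
      have hLcne : Lc ≠ [] := by
        intro hcontra
        rw [hcontra] at hlle
        simp [pvMaxN] at hlle
        omega
      obtain ⟨e_c, h1, h2, h3, h4⟩ := hcons hLcne
      have hmx : max (pvMaxN Lc) l = pvMaxN Lc := by omega
      rw [hmx]
      have hmem : pvMaxN Lc ∈ Lc :=
        (PySem.List.index?_isSome_iff Lc (pvMaxN Lc)).mp (by rw [h1]; rfl)
      have he : (PySem.List.index? L (pvMaxN Lc)).getD 0 = e_c := by
        rw [hL, PySem.List.index?_append_of_mem _ hmem, h1, Option.getD_some]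
      rw [he]
      have hA : (if stA.2.length > stA.1.length then stA.2 else stA.1) = stA.1 := by
        rw [if_neg (by omega)]
      rw [hA, h4]
      have hcast1 : ((e_c : Nat) : Int) - ((pvMaxN Lc : Nat) : Int) + 1
          = ((e_c + 1 - pvMaxN Lc : Nat) : Int) := by
        push_cast [Nat.cast_sub (by omega : pvMaxN Lc ≤ e_c + 1)]
        ring
      have hcast2 : ((e_c : Nat) : Int) + 1 = ((e_c + 1 : Nat) : Int) := by push_cast; ring
      rw [hcast1, hcast2, PySem.List.slice_natCast]
      have : e_c + 1 - (e_c + 1 - pvMaxN Lc) = pvMaxN Lc := by omega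
      rw [this]
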